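-- pv_equiv track=rewrite | github.com/Tawana2000/Python | compare-number.py | positive_dominant
-- ===== SOURCE A (Python) =====
-- def positive_dominant(lst):
--
--     count_positive = 0
--     count_negative = 0
--
--     for i in lst:
--         if i > 0:
--             count_positive += 1
--         else:
--             count_negative += 1
--
--     if count_positive > count_negative:
--         return True
--     else:
--         return False
-- ===== SOURCE B (Python) =====
-- def positive_dominant(lst):
--     if not lst:
--         return False
--     s = sorted(lst, reverse=True)
--     return s[len(lst) // 2] > 0
-- ===== Notes on version B (the rewrite author's own statement) =====
-- stated objective: alternative
-- what changed: Replaces the counting loop with a sort-based median test: sort descending and check whether the element at index len//2 is positive, which holds exactly when positives outnumber non-positives.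
import Mathlib
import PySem

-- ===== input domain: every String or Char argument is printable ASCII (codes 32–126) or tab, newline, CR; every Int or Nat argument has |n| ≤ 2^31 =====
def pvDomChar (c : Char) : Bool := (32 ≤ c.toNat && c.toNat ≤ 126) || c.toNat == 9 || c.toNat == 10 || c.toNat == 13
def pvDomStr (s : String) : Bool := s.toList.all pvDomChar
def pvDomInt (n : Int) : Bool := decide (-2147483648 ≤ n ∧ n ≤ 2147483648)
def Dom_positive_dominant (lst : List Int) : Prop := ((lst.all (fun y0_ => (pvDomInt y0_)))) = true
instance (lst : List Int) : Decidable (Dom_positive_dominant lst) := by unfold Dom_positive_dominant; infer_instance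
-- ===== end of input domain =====

-- ===== PORT A =====
-- B replaces A's counting loop with a sort-based median test (alternative algorithm; return value only).
def positive_dominant (lst : List Int) : Bool :=
  let counts := lst.foldl (fun (acc : Int × Int) i =>
    if i > 0 then (acc.1 + 1, acc.2) else (acc.1, acc.2 + 1)) (0, 0)
  if counts.1 > counts.2 then true else false

-- ===== PORT B =====
def positive_dominant_alt (lst : List Int) : Bool :=
  if lst = [] then false
  else
    let s := PySem.List.sorted lst (fun x => x) true
    -- s[len(lst)//2]: the index is always in range (nonempty list), so the default is unreachable
    decide (0 < PySem.List.pyGetD s (PySem.Int.floordiv (lst.length : Int) 2) 0)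

-- ===== PRECONDITION & SPEC =====
def Spec_positive_dominant (lst : List Int) (out : Bool) : Prop := out = positive_dominant_alt lst
instance (lst : List Int) (out : Bool) : Decidable (Spec_positive_dominant lst out) := by unfold Spec_positive_dominant; infer_instance

-- ===== CLAIM =====
def Claim_equal_positive_dominant : Prop := ∀ (lst : List Int), Dom_positive_dominant lst → Spec_positive_dominant lst (positive_dominant lst)

-- ===== LEMMAS AND PROOFS =====

-- A's fold counts positives and non-positives.
theorem foldl_counts (lst : List Int) (cp cn : Int) :
    lst.foldl (fun (acc : Int × Int) i =>
      if i > 0 then (acc.1 + 1, acc.2) else (acc.1, acc.2 + 1)) (cp, cn)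
    = (cp + (lst.countP (fun x => decide (0 < x)) : Int),
       cn + ((lst.length : Int) - (lst.countP (fun x => decide (0 < x)) : Int))) := by
  induction lst generalizing cp cn with
  | nil => simp
  | cons x xs ih =>
    simp only [List.foldl_cons, List.countP_cons, List.length_cons]
    by_cases hx : x > 0 <;>
      simp only [hx, ite_true, ite_false, decide_eq_true_eq, gt_iff_lt] <;> rw [ih] <;>
      simp <;> omega

-- In a descending list, the element at index k is positive iff more than k elements are positive.
theorem desc_count (s : List Int) (hp : s.Pairwise (fun a b => b ≤ a)) (k : Nat)
    (hk : k < s.length) :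
    (0 < s[k]) ↔ k < s.countP (fun x => decide (0 < x)) := by
  rw [List.pairwise_iff_getElem] at hp
  constructor
  · intro hpos
    have hsplit : s.countP (fun x => decide (0 < x))
        = (s.take (k+1)).countP (fun x => decide (0 < x))
          + (s.drop (k+1)).countP (fun x => decide (0 < x)) := by
      rw [← List.countP_append, List.take_append_drop]
    have hall : (s.take (k+1)).countP (fun x => decide (0 < x)) = (s.take (k+1)).length := by
      rw [List.countP_eq_length]
      intro a ha
      obtain ⟨i, hi, rfl⟩ := List.mem_iff_getElem.mp ha
      have hi' : i < k + 1 := by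
        have := hi; simp [List.length_take] at this; omega
      rw [List.getElem_take]
      rcases Nat.lt_or_ge i k with h | h
      · have := hp i k (by omega) hk h
        simp only [decide_eq_true_eq]; omega
      · have : i = k := by omega
        subst this; simpa using hpos
    have hlen : (s.take (k+1)).length = k + 1 := by simp; omega
    omega
  · intro hcnt
    by_contra hnp
    simp only [not_lt] at hnp
    have hsplit : s.countP (fun x => decide (0 < x))
        = (s.take k).countP (fun x => decide (0 < x))
          + (s.drop k).countP (fun x => decide (0 < x)) := by
      rw [← List.countP_append, List.take_append_drop]
    have hzero : (s.drop k).countP (fun x => decide (0 < x)) = 0 := by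
      rw [List.countP_eq_zero]
      intro a ha
      obtain ⟨i, hi, rfl⟩ := List.mem_iff_getElem.mp ha
      rw [List.getElem_drop]
      simp only [decide_eq_true_eq, not_lt]
      rcases Nat.eq_zero_or_pos i with h | h
      · subst h; simpa using hnp
      · have := hp k (k + i) hk (by simp at hi; omega) (by omega)
        omega
    have htk : (s.take k).countP (fun x => decide (0 < x)) ≤ k := by
      calc (s.take k).countP (fun x => decide (0 < x)) ≤ (s.take k).length := List.countP_le_length
        _ ≤ k := by simp
    omega

-- ===== VERDICT =====
theorem positive_dominant_spec : Claim_equal_positive_dominant := by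
  intro lst _
  unfold Spec_positive_dominant positive_dominant positive_dominant_alt
  rcases eq_or_ne lst [] with rfl | hne
  · simp
  · simp only [hne, ite_false]
    set s := PySem.List.sorted lst (fun x => x) true with hs
    have hperm : s.Perm lst := PySem.List.sorted_perm lst (fun x => x) true
    have hlen : s.length = lst.length := hperm.length_eq
    have hcnt : s.countP (fun x => decide (0 < x)) = lst.countP (fun x => decide (0 < x)) :=
      hperm.countP_eq _
    have hpair : s.Pairwise (fun a b => b ≤ a) := by
      have := PySem.List.sorted_pairwise_rev lst (fun x => x)
      simpa using this
    have hlpos : 0 < lst.length := List.length_pos_of_ne_nil hne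
    set k : Nat := lst.length / 2 with hk
    have hkl : k < s.length := by omega
    have hidx : PySem.Int.floordiv (lst.length : Int) 2 = (k : Int) := by
      exact_mod_cast PySem.Int.floordiv_natCast lst.length 2
    rw [hidx]
    have hget : PySem.List.pyGetD s (k : Int) 0 = s[k] := by
      rw [PySem.List.pyGetD_natCast, List.getD_eq_getElem?_getD, List.getElem?_eq_getElem hkl,
        Option.getD_some]
    rw [hget]
    rw [foldl_counts]
    have hiff := desc_count s hpair k hkl
    rw [hcnt] at hiff
    set c := lst.countP (fun x => decide (0 < x)) with hc
    have hcle : c ≤ lst.length := List.countP_le_length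
    by_cases hpos : (0:Int) < s[k]
    · rw [decide_eq_true hpos]
      have : k < c := hiff.mp hpos
      rw [if_pos]; push_cast; omega
    · rw [decide_eq_false hpos]
      have : ¬ k < c := fun h => hpos (hiff.mpr h)
      rw [if_neg]; push_cast; omega
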